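-- pv_equiv track=rewrite | github.com/Asutherland8219/TMU_assignments | Completed/duplicate_digit_bonus.py | duplicate_digit_bonus
-- ===== SOURCE A (Python) =====
-- def duplicate_digit_bonus(n):
--     digit = str(n)
--     index = 0
--     result = 1
--     d = digit[0]
--     for i in range(1,len(digit)):
--         if d == digit[i]:
--             result += 1
--             if i+1 == len(digit):
--                 index += 2 * 10**(result-2)
--         else:
--             if result >=2:
--                 index += 10**(result-2)
--             result = 1
--         d = digit[i]
--     return index
-- ===== SOURCE B (Python) =====
-- def duplicate_digit_bonus(n):
--     # Two-phase: run-length encode str(n), then sum bonuses (last run counts twice).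
--     s = str(n)
--     runs = []
--     rest = s
--     while rest:
--         c = rest[0]
--         k = 1
--         while k < len(rest) and rest[k] == c:
--             k += 1
--         runs.append(k)
--         rest = rest[k:]
--     total = sum(10 ** (L - 2) for L in runs if L >= 2)
--     if runs and runs[-1] >= 2:
--         total += 10 ** (runs[-1] - 2)
--     return total
-- ===== Notes on version B (the rewrite author's own statement) =====
-- stated objective: alternative
-- what changed: A's single stateful scan (running run-length counter with in-loop bonus/double-bonus updates) is replaced by a two-phase decomposition: first run-length-encode str(n) into a list of run lengths, then sum the power-of-ten bonus over all runs of length at least two, adding the last run's bonus once more (the final run counts twice, as in A).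
import Mathlib
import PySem

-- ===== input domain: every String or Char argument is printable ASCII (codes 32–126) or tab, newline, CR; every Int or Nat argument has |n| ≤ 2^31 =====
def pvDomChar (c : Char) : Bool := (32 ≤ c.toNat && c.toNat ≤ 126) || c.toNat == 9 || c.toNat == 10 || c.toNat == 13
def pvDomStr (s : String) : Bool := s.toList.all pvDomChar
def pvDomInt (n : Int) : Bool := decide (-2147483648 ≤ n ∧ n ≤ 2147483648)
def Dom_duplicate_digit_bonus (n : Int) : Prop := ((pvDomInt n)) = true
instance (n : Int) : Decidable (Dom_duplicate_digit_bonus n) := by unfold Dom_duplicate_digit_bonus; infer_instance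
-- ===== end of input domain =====

-- B rewrites A's single stateful scan as a two-phase run-length decomposition (alternative structure, same cost); return values are proved equal.

-- ===== PORT A =====
-- the for-loop over range(1, len(digit)) with state (index, result, d), as structural
-- recursion over the remaining characters; 'i+1 == len(digit)' becomes 'rest = []'
def pvALoop (d : Char) (index result : Int) : List Char → Int
  | [] => index
  | c :: rest =>
    if d = c then
      let result' := result + 1
      let index' := if rest = [] then index + 2 * 10 ^ ((result' - 2).toNat) else index
      pvALoop c index' result' rest
    else
      let index' := if result ≥ 2 then index + 10 ^ ((result - 2).toNat) else index
      pvALoop c index' 1 rest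

-- 'd = digit[0]' then the loop; the [] case is unreachable (str(n) is never empty;
-- on an empty string Python's digit[0] would raise)
def pvAStart : List Char → Int
  | [] => 0
  | d :: rest => pvALoop d 0 1 rest

def duplicate_digit_bonus (n : Int) : Int :=
  pvAStart (PySem.Int.toStr n).toList

-- ===== PORT B =====
-- inner loop 'while k < len(rest) and rest[k] == c: k += 1' together with 'rest = rest[k:]':
-- returns (number of chars after the head equal to c, the remainder)
def pvTakeRun (c : Char) : List Char → Int × List Char
  | [] => (0, [])
  | x :: xs => if x = c then ((pvTakeRun c xs).1 + 1, (pvTakeRun c xs).2) else (0, x :: xs)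

theorem pvTakeRun_len (c : Char) : ∀ (l : List Char), (pvTakeRun c l).2.length ≤ l.length
  | [] => le_refl _
  | x :: xs => by
    simp only [pvTakeRun]
    split
    · exact le_trans (pvTakeRun_len c xs) (Nat.le_succ _)
    · exact le_refl _

-- outer 'while rest:' loop building the list of run lengths
def pvRuns : List Char → List Int
  | [] => []
  | c :: xs => (1 + (pvTakeRun c xs).1) :: pvRuns (pvTakeRun c xs).2
termination_by l => l.length
decreasing_by exact Nat.lt_succ_of_le (pvTakeRun_len c xs)

def duplicate_digit_bonus_alt (n : Int) : Int :=
  let runs := pvRuns (PySem.Int.toStr n).toList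
  let total := runs.foldl (fun a L => if L ≥ 2 then a + 10 ^ ((L - 2).toNat) else a) 0
  match runs.getLast? with
  | some L => if L ≥ 2 then total + 10 ^ ((L - 2).toNat) else total
  | none => total

-- ===== PRECONDITION & SPEC =====
def Spec_duplicate_digit_bonus (n : Int) (out : Int) : Prop := out = duplicate_digit_bonus_alt n
instance (n : Int) (out : Int) : Decidable (Spec_duplicate_digit_bonus n out) := by unfold Spec_duplicate_digit_bonus; infer_instance

-- ===== CLAIM (what is proved, stated in full; the proofs are below) =====
def Claim_equal_duplicate_digit_bonus : Prop := ∀ (n : Int), Dom_duplicate_digit_bonus n → Spec_duplicate_digit_bonus n (duplicate_digit_bonus n)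

-- ===== LEMMAS AND PROOFS =====

-- bonus of a single run length
def pvF (L : Int) : Int := if L ≥ 2 then 10 ^ ((L - 2).toNat) else 0

-- total bonus of a run-length list, with the final run counted twice
def pvBtot (l : List Int) : Int :=
  l.foldl (fun a L => if L ≥ 2 then a + 10 ^ ((L - 2).toNat) else a) 0 +
    (match l.getLast? with | some L => pvF L | none => 0)

theorem pvFoldl_shift : ∀ (l : List Int) (a : Int),
    l.foldl (fun a L => if L ≥ 2 then a + 10 ^ ((L - 2).toNat) else a) a
      = a + l.foldl (fun a L => if L ≥ 2 then a + 10 ^ ((L - 2).toNat) else a) 0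
  | [], a => by simp
  | x :: xs, a => by
    simp only [List.foldl]
    rw [pvFoldl_shift xs, pvFoldl_shift xs (if x ≥ 2 then 0 + 10 ^ ((x - 2).toNat) else 0)]
    split <;> ring

theorem pvBtot_cons (a : Int) (l : List Int) (h : l ≠ []) :
    pvBtot (a :: l) = pvF a + pvBtot l := by
  cases l with
  | nil => exact absurd rfl h
  | cons b t =>
    unfold pvBtot
    rw [List.getLast?_cons_cons]
    simp only [List.foldl]
    rw [pvFoldl_shift t, pvFoldl_shift t (if b ≥ 2 then 0 + 10 ^ ((b - 2).toNat) else 0)]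
    unfold pvF
    split <;> split <;> ring

theorem pvBtot_single (a : Int) : pvBtot [a] = pvF a + pvF a := by
  unfold pvBtot pvF
  simp only [List.foldl, List.getLast?_singleton]
  split <;> ring

theorem pvTakeRun_cons_self (c : Char) (xs : List Char) :
    pvTakeRun c (c :: xs) = ((pvTakeRun c xs).1 + 1, (pvTakeRun c xs).2) := by
  simp [pvTakeRun]

theorem pvTakeRun_cons_ne (c x : Char) (xs : List Char) (h : x ≠ c) :
    pvTakeRun c (x :: xs) = (0, x :: xs) := by
  simp [pvTakeRun, h]

theorem pvRuns_cons (c : Char) (xs : List Char) :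
    pvRuns (c :: xs) = (1 + (pvTakeRun c xs).1) :: pvRuns (pvTakeRun c xs).2 := by
  rw [pvRuns]

theorem pvALoop_cons (d c : Char) (index res : Int) (rest : List Char) :
    pvALoop d index res (c :: rest) =
      if d = c then
        pvALoop c (if rest = [] then index + 2 * 10 ^ ((res + 1 - 2).toNat) else index) (res + 1) rest
      else
        pvALoop c (if res ≥ 2 then index + 10 ^ ((res - 2).toNat) else index) 1 rest := by
  rw [pvALoop]

theorem pvALoop_main : ∀ (rest : List Char) (d : Char) (index res : Int), 1 ≤ res →
    pvALoop d index res rest =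
      index + (if rest = [] then 0
        else pvBtot ((res + (pvTakeRun d rest).1) :: pvRuns (pvTakeRun d rest).2))
  | [], d, index, res, _ => by simp [pvALoop]
  | c :: rest0, d, index, res, hres => by
    rw [pvALoop_cons, if_neg (List.cons_ne_nil c rest0)]
    by_cases hdc : d = c
    · subst hdc
      rw [if_pos rfl, pvTakeRun_cons_self]
      cases rest0 with
      | nil =>
        rw [if_pos rfl]
        simp only [pvTakeRun, pvRuns, pvALoop]
        rw [pvBtot_single]
        have h2 : res + (0 + 1) ≥ 2 := by omega
        unfold pvF
        rw [if_pos h2]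
        have he : res + (0 + 1) - 2 = res + 1 - 2 := by ring
        rw [he]
        ring
      | cons c1 rest1 =>
        rw [if_neg (List.cons_ne_nil c1 rest1)]
        rw [pvALoop_main (c1 :: rest1) d index (res + 1) (by omega)]
        rw [if_neg (List.cons_ne_nil c1 rest1)]
        have he : res + ((pvTakeRun d (c1 :: rest1)).1 + 1)
            = res + 1 + (pvTakeRun d (c1 :: rest1)).1 := by ring
        rw [he]
    · rw [if_neg hdc, pvTakeRun_cons_ne d c rest0 (fun h => hdc (Eq.symm h))]
      rw [pvALoop_main rest0 c _ 1 (le_refl 1)]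
      rw [pvRuns_cons, pvBtot_cons _ _ (List.cons_ne_nil _ _)]
      have hr0 : res + (0 : Int) = res := by ring
      rw [hr0]
      cases rest0 with
      | nil =>
        rw [if_pos rfl]
        simp only [pvTakeRun, pvRuns]
        rw [pvBtot_single]
        have hF1 : pvF (1 + 0) = 0 := by unfold pvF; norm_num
        rw [hF1]
        unfold pvF
        split_ifs <;> ring
      | cons c2 rest2 =>
        rw [if_neg (List.cons_ne_nil c2 rest2)]
        unfold pvF
        split_ifs <;> ring
termination_by rest => rest.length
decreasing_by
  · simp
  · simp

theorem pvAStart_eq_runs : ∀ (cs : List Char), pvAStart cs = pvBtot (pvRuns cs)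
  | [] => by simp [pvAStart, pvRuns, pvBtot]
  | d :: rest => by
    simp only [pvAStart]
    rw [pvALoop_main rest d 0 1 (le_refl 1)]
    cases rest with
    | nil =>
      rw [if_pos rfl, pvRuns_cons]
      norm_num [pvTakeRun, pvRuns, pvBtot_single, pvF]
    | cons c rest3 =>
      rw [if_neg (List.cons_ne_nil c rest3), pvRuns_cons]
      ring

theorem pvAlt_eq_Btot (n : Int) :
    duplicate_digit_bonus_alt n = pvBtot (pvRuns (PySem.Int.toStr n).toList) := by
  simp only [duplicate_digit_bonus_alt, pvBtot]
  cases h : (pvRuns (PySem.Int.toStr n).toList).getLast? with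
  | none => simp
  | some L =>
    unfold pvF
    split
    · split <;> ring
    · ring

-- ===== VERDICT (by name: the statement is the Claim_ definition above) =====
theorem duplicate_digit_bonus_spec : Claim_equal_duplicate_digit_bonus := by
  intro n _
  unfold Spec_duplicate_digit_bonus duplicate_digit_bonus
  rw [pvAlt_eq_Btot, pvAStart_eq_runs]
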